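-- pv_equiv track=rewrite | github.com/5P2RS5/Python_for_infra | programmers/1/64061.py | solution
-- ===== SOURCE A (Python) =====
-- def solution(board, moves):
--     answer = 0
--
--     l = []
--     c = []
--
--     for i in range(0, len(board)):
--         l.append([])
--         for j in range(len(board) - 1, -1, -1):
--             if(board[j][i] == 0):
--                 continue
--             else:
--                 l[i].append(board[j][i])
--
--     for i in moves:
--         if len(l[i - 1]) >= 1 :
--             top = l[i - 1].pop()
--             c.append(top)
--         if len(c) >= 2 and c[-1] == c[-2] :
--             c.pop()
--             c.pop()
--             answer += 2
--
--     return answer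
-- ===== SOURCE B (Python) =====
-- def solution(board, moves):
--     # On-demand column scan with per-column row pointers; compare-before-push cancellation.
--     n = len(board)
--     ptr = [0] * n
--     basket = []
--     answer = 0
--     for m in moves:
--         col = m - 1
--         r = ptr[col]
--         while r < n and board[r][col] == 0:
--             r += 1
--         if r < n:
--             v = board[r][col]
--             ptr[col] = r + 1
--             if basket and basket[-1] == v:
--                 basket.pop()
--                 answer += 2
--             else:
--                 basket.append(v)
--     return answer
-- ===== Notes on version B (the rewrite author's own statement) =====
-- stated objective: alternative
-- what changed: B drops A's upfront construction of all column stacks: it keeps one row pointer per column and scans that column downward on demand at each move, and it cancels pairs by comparing the new doll with the basket top before pushing instead of A's push-then-pop-two.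
-- outside the precondition, e.g. on solution([[7, 5], [9, 5, 6]], [0, 0]): A returns 2, B returns 0
import Mathlib
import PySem

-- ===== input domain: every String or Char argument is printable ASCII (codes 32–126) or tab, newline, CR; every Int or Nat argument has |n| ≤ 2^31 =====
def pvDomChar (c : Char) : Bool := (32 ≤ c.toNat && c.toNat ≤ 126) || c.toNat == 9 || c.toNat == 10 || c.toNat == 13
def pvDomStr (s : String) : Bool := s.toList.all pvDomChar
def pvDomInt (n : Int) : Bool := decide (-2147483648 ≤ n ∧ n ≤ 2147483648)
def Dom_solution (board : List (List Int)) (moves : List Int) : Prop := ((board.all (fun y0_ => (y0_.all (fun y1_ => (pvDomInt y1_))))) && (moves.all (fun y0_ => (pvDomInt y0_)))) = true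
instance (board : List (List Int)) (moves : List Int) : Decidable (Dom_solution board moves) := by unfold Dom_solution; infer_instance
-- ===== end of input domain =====

-- B replaces A's upfront construction of every column stack by per-column row pointers with an
-- on-demand downward scan, and cancels by comparing before pushing instead of push-then-pop-two
-- (objective: alternative; return-value equivalence only — the Pythons do not mutate their arguments).

-- ===== PORT A =====
-- inner loop 'for j in range(len(board)-1,-1,-1): if board[j][i]==0: continue else: l[i].append(...)'
def buildCol (board : List (List Int)) (i : Int) : List Int :=
  (PySem.List.pyRange ((board.length : Int) - 1) (-1) (-1)).foldl
    (fun acc j =>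
      if PySem.List.pyGetD (PySem.List.pyGetD board j []) i 0 = 0 then acc
      else acc ++ [PySem.List.pyGetD (PySem.List.pyGetD board j []) i 0]) []

-- one iteration of A's 'for i in moves' loop over the state (l, c, answer)
def stepA (st : List (List Int) × List Int × Int) (m : Int) :
    List (List Int) × List Int × Int :=
  let l := st.1; let c := st.2.1; let ans := st.2.2
  let stack := PySem.List.pyGetD l (m - 1) []
  let lc : List (List Int) × List Int :=
    if 1 ≤ stack.length then
      (PySem.List.pySetD l (m - 1) stack.dropLast,
       c ++ [PySem.List.pyGetD stack (-1) 0])           -- top = l[i-1].pop()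
    else (l, c)
  if 2 ≤ lc.2.length ∧ PySem.List.pyGetD lc.2 (-1) 0 = PySem.List.pyGetD lc.2 (-2) 0 then
    (lc.1, lc.2.dropLast.dropLast, ans + 2)
  else (lc.1, lc.2, ans)

def solution (board : List (List Int)) (moves : List Int) : Int :=
  let l := (PySem.List.pyRange 0 (board.length : Int) 1).map (fun i => buildCol board i)
  (moves.foldl stepA (l, [], 0)).2.2

-- ===== PORT B =====
-- 'while r < n and board[r][col] == 0: r += 1' — returns the final r
def scanB (board : List (List Int)) (col : Int) (r : Int) : Int :=
  if h : r < (board.length : Int) then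
    if PySem.List.pyGetD (PySem.List.pyGetD board r []) col 0 = 0 then
      scanB board col (r + 1)
    else r
  else r
termination_by ((board.length : Int) - r).toNat
decreasing_by omega

-- one iteration of B's 'for m in moves' loop over the state (ptr, basket, answer)
def stepB (board : List (List Int)) (st : List Int × List Int × Int) (m : Int) :
    List Int × List Int × Int :=
  let ptr := st.1; let basket := st.2.1; let ans := st.2.2
  let col := m - 1
  let r := scanB board col (PySem.List.pyGetD ptr col 0)
  if r < (board.length : Int) then
    let v := PySem.List.pyGetD (PySem.List.pyGetD board r []) col 0
    let ptr' := PySem.List.pySetD ptr col (r + 1)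
    if basket ≠ [] ∧ PySem.List.pyGetD basket (-1) 0 = v then
      (ptr', basket.dropLast, ans + 2)
    else (ptr', basket ++ [v], ans)
  else (ptr, basket, ans)

def solution_alt (board : List (List Int)) (moves : List Int) : Int :=
  (moves.foldl (stepB board) (List.replicate board.length 0, [], 0)).2.2

-- ===== PRECONDITION & SPEC =====
-- Pre_ excludes boards with a row shorter than the board height and moves past Python's
-- index-wrap range (A raises IndexError on both), and the corner where a non-positive (wrapping)
-- move meets a row longer than the board height: there A's wrap picks from the stack of a true
-- column while B's row scan reads the row ends, and neither value is specified for such input.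
def Pre_solution (board : List (List Int)) (moves : List Int) : Prop :=
  (∀ row ∈ board, board.length ≤ row.length) ∧
  (∀ m ∈ moves, 1 - (board.length : Int) ≤ m ∧ m ≤ (board.length : Int)) ∧
  ((∃ m ∈ moves, m ≤ 0) → ∀ row ∈ board, row.length = board.length)
instance (board : List (List Int)) (moves : List Int) : Decidable (Pre_solution board moves) := by
  unfold Pre_solution; infer_instance
def pvWitness_solution : List (List Int) × List Int :=
  ([[1, 0, 3], [2, 0, 3], [2, 1, 0]], [1, 2, 3, 3, 1, 1, 2])
def Spec_solution (board : List (List Int)) (moves : List Int) (out : Int) : Prop := out = solution_alt board moves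
instance (board : List (List Int)) (moves : List Int) (out : Int) : Decidable (Spec_solution board moves out) := by unfold Spec_solution; infer_instance

-- ===== CLAIM (what is proved, stated in full; the proofs are below) =====
def Claim_equal_solution : Prop := ∀ (board : List (List Int)) (moves : List Int), Dom_solution board moves → Pre_solution board moves → Spec_solution board moves (solution board moves)

-- ===== LEMMAS AND PROOFS =====

-- the value at board[j][col] as both ports read it (0-default outside the list)
def cellR (board : List (List Int)) (j col : Nat) : Int := (board.getD j []).getD col 0

-- the dolls of column `col`, top row first, zeros skipped
def picks (rows : List (List Int)) (col : Nat) : List Int :=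
  rows.filterMap (fun row => if row.getD col 0 = 0 then none else some (row.getD col 0))

-- characterisation of A's column build: the reversed pick list
theorem buildCol_aux (col : Nat) (rows : List (List Int)) : ∀ (acc : List Int),
    (List.range rows.length).reverse.foldl
      (fun acc j =>
        if PySem.List.pyGetD (PySem.List.pyGetD rows ((j : Nat) : Int) []) (col : Int) 0 = 0 then acc
        else acc ++ [PySem.List.pyGetD (PySem.List.pyGetD rows ((j : Nat) : Int) []) (col : Int) 0])
      acc = acc ++ (picks rows col).reverse := by
  induction rows using List.reverseRecOn with
  | nil => intro acc; simp [picks]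
  | append_singleton rows row ih =>
    intro acc
    rw [List.length_append, List.length_singleton, List.range_succ, List.reverse_append,
        List.reverse_singleton, List.singleton_append, List.foldl_cons]
    have hrow : PySem.List.pyGetD (rows ++ [row]) ((rows.length : Nat) : Int) [] = row := by
      rw [PySem.List.pyGetD_natCast]
      simp [List.getD_eq_getElem?_getD]
    rw [hrow]
    rw [PySem.List.foldl_congr_mem ((List.range rows.length).reverse) _
        (fun acc (j : Nat) =>
          if PySem.List.pyGetD (PySem.List.pyGetD rows (j : Int) []) (col : Int) 0 = 0 then acc
          else acc ++ [PySem.List.pyGetD (PySem.List.pyGetD rows (j : Int) []) (col : Int) 0]) _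
        (by
          intro acc' j hj
          have hjlt : j < rows.length := List.mem_range.mp (List.mem_reverse.mp hj)
          have he : PySem.List.pyGetD (rows ++ [row]) ((j : Nat) : Int) [] =
              PySem.List.pyGetD rows ((j : Nat) : Int) [] := by
            rw [PySem.List.pyGetD_natCast, PySem.List.pyGetD_natCast]
            simp [List.getD_eq_getElem?_getD, List.getElem?_append_left hjlt]
          rw [he])]
    rw [ih]
    have hpick : picks (rows ++ [row]) col = picks rows col ++ picks [row] col := by
      simp [picks]
    rw [hpick, List.reverse_append]
    by_cases hz : PySem.List.pyGetD row (col : Int) 0 = 0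
    · have hz2 : row[col]?.getD 0 = 0 := by
        rw [← List.getD_eq_getElem?_getD]; simpa using hz
      simp [picks, hz, hz2]
    · have hz2 : ¬ row[col]?.getD 0 = 0 := by
        rw [← List.getD_eq_getElem?_getD]; simpa using hz
      have hv : PySem.List.pyGetD row (col : Int) 0 = row[col]?.getD 0 := by simp
      simp [picks, hz2, hv]

theorem buildCol_eq (board : List (List Int)) (col : Nat) :
    buildCol board (col : Int) = (picks board col).reverse := by
  unfold buildCol
  rw [PySem.List.pyRange_neg_one_eq_reverse]
  have h1 : ((board.length : Int) - 1 + 1) = (board.length : Int) := by ring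
  have h0 : (-1 : Int) + 1 = 0 := by ring
  rw [h1, h0, PySem.List.pyRange_zero_nat]
  rw [← List.map_reverse, List.foldl_map]
  exact buildCol_aux col board []

theorem picks_drop_cons (board : List (List Int)) (col r : Nat) (h : r < board.length) :
    picks (board.drop r) col =
      if cellR board r col = 0 then picks (board.drop (r + 1)) col
      else cellR board r col :: picks (board.drop (r + 1)) col := by
  rw [List.drop_eq_getElem_cons h]
  have hc : cellR board r col = board[r].getD col 0 := by
    unfold cellR
    rw [List.getD_eq_getElem board [] h]
  rw [hc]
  simp only [picks, List.filterMap_cons]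
  by_cases hz : board[r].getD col 0 = 0
  · rw [if_pos hz, if_pos hz]
  · rw [if_neg hz, if_neg hz]

-- total-form reads/writes through Python's index rule, given the resolved Nat index
theorem pyGetD_pyIdx {α : Type} (xs : List α) (i : Int) (d : α) (col : Nat)
    (h : PySem.List.pyIdx? xs.length i = some col) :
    PySem.List.pyGetD xs i d = xs.getD col d := by
  have hcol : col < xs.length := by
    simp only [PySem.List.pyIdx?] at h
    split_ifs at h <;> simp_all <;> omega
  simp [PySem.List.pyGetD, PySem.List.pyGet?, h, List.getD_eq_getElem?_getD,
        List.getElem?_eq_getElem hcol]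

theorem pySetD_pyIdx {α : Type} (xs : List α) (i : Int) (v : α) (col : Nat)
    (h : PySem.List.pyIdx? xs.length i = some col) :
    PySem.List.pySetD xs i v = xs.set col v := by
  simp [PySem.List.pySetD, PySem.List.pySet?, h]

-- a move index 1-n ≤ m ≤ n resolves to one Nat column
theorem pyColIdx (n : Nat) (m : Int) (h1 : 1 - (n:Int) ≤ m) (h2 : m ≤ (n:Int)) :
    ∃ col : Nat, col < n ∧ PySem.List.pyIdx? n (m - 1) = some col := by
  by_cases hp : 0 ≤ m - 1
  · refine ⟨(m - 1).toNat, by omega, ?_⟩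
    rw [PySem.List.pyIdx?, if_pos hp, if_pos (by omega : m - 1 < (n:Int))]
  · refine ⟨n - (-(m - 1)).toNat, by omega, ?_⟩
    simp only [PySem.List.pyIdx?, if_neg hp, if_pos (by omega : -(n:Int) ≤ m - 1)]

theorem cell_read (board : List (List Int)) (ci : Int) (col : Nat)
    (hci : ∀ row ∈ board, PySem.List.pyGetD row ci 0 = row.getD col 0)
    (r : Nat) (hr : r < board.length) :
    PySem.List.pyGetD (PySem.List.pyGetD board (r : Int) []) ci 0 = cellR board r col := by
  have h1 : PySem.List.pyGetD board (r : Int) [] = board[r] := by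
    rw [PySem.List.pyGetD_natCast, List.getD_eq_getElem _ _ hr]
  rw [h1, hci board[r] (List.getElem_mem hr)]
  unfold cellR
  rw [List.getD_eq_getElem _ _ hr]

-- scan characterisation: scanB finds exactly the head of the remaining pick stream
theorem scan_char (board : List (List Int)) (col : Nat) (ci : Int)
    (hci : ∀ row ∈ board, PySem.List.pyGetD row ci 0 = row.getD col 0) :
    ∀ (k r : Nat), board.length - r = k → r ≤ board.length →
      (picks (board.drop r) col = [] → scanB board ci (r : Int) = (board.length : Int)) ∧
      (∀ v rest, picks (board.drop r) col = v :: rest →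
        ∃ j : Nat, r ≤ j ∧ j < board.length ∧ scanB board ci (r : Int) = (j : Int) ∧
          cellR board j col = v ∧ picks (board.drop (j + 1)) col = rest) := by
  intro k
  induction k with
  | zero =>
    intro r hk hr
    have hrl : r = board.length := by omega
    subst hrl
    constructor
    · intro _
      rw [scanB]; simp
    · intro v rest hvr
      rw [List.drop_length] at hvr
      simp [picks] at hvr
  | succ k ih =>
    intro r hk hr
    have hrlt : r < board.length := by omega
    have hnext := ih (r + 1) (by omega) (by omega)
    have hstep : scanB board ci (r : Int) =
        if cellR board r col = 0 then scanB board ci ((r : Int) + 1) else (r : Int) := by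
      rw [scanB]
      rw [dif_pos (by exact_mod_cast hrlt)]
      rw [cell_read board ci col hci r hrlt]
    have hcast : ((r : Int) + 1) = ((r + 1 : Nat) : Int) := by push_cast; ring
    rw [picks_drop_cons board col r hrlt]
    by_cases hz : cellR board r col = 0
    · rw [if_pos hz] at hstep ⊢
      rw [hstep, hcast]
      constructor
      · intro h; exact hnext.1 h
      · intro v rest hvr
        obtain ⟨j, hj1, hj2, hj3, hj4, hj5⟩ := hnext.2 v rest hvr
        exact ⟨j, by omega, hj2, hj3, hj4, hj5⟩
    · rw [if_neg hz] at hstep ⊢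
      constructor
      · intro h; exact absurd h (by simp)
      · intro v rest hvr
        have hv : cellR board r col = v ∧ picks (board.drop (r + 1)) col = rest := by
          constructor
          · exact (List.cons.injEq _ _ _ _ ▸ hvr : _ ∧ _).1
          · exact (List.cons.injEq _ _ _ _ ▸ hvr : _ ∧ _).2
        exact ⟨r, le_refl r, hrlt, hstep, hv.1, hv.2⟩

-- A's cancellation test is false on a basket with no equal neighbours
theorem no_cancel_of_chain (c : List Int) (hch : c.IsChain (· ≠ ·)) :
    ¬ (2 ≤ c.length ∧ PySem.List.pyGetD c (-1) 0 = PySem.List.pyGetD c (-2) 0) := by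
  rintro ⟨hlen, heq⟩
  rw [PySem.List.pyGetD_neg_ofNat c 1 0 (by omega) (by omega)] at heq
  rw [PySem.List.pyGetD_neg_ofNat c 2 0 (by omega) (by omega)] at heq
  have hc := (List.isChain_iff_getElem.mp hch) (c.length - 2) (by omega)
  have hi : c.length - 2 + 1 = c.length - 1 := by omega
  simp only [hi] at hc
  exact hc heq.symm

-- the simulation relation between A's state (l, c, ans) and B's state (ptr, basket, ans)
def SimRel (board : List (List Int)) (s : List (List Int) × List Int × Int)
    (t : List Int × List Int × Int) : Prop :=
  s.2.1 = t.2.1 ∧ s.2.2 = t.2.2 ∧ s.2.1.IsChain (· ≠ ·) ∧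
  s.1.length = board.length ∧ t.1.length = board.length ∧
  ∀ col : Nat, col < board.length → ∃ p : Nat, p ≤ board.length ∧
    t.1.getD col 0 = (p : Int) ∧ s.1.getD col [] = (picks (board.drop p) col).reverse

theorem step_rel (board : List (List Int)) (m : Int)
    (hm1 : 1 - (board.length : Int) ≤ m) (hm2 : m ≤ (board.length : Int))
    (hsq : ∀ row ∈ board, board.length ≤ row.length)
    (hwrap : m ≤ 0 → ∀ row ∈ board, row.length = board.length)
    (s : List (List Int) × List Int × Int) (t : List Int × List Int × Int)
    (h : SimRel board s t) : SimRel board (stepA s m) (stepB board t m) := by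
  obtain ⟨l, c, ans⟩ := s
  obtain ⟨ptr, bk, ansB⟩ := t
  obtain ⟨hc, hans, hch, hllen, hplen, hcols⟩ := h
  simp only at hc hans hch hllen hplen hcols
  subst hc hans
  set n := board.length with hn
  obtain ⟨col, hcol, hidx⟩ := pyColIdx n m hm1 hm2
  have hidxrow : ∀ row ∈ board, PySem.List.pyIdx? row.length (m - 1) = some col := by
    intro row hrow
    by_cases hp : 0 ≤ m - 1
    · have hrl : n ≤ row.length := hsq row hrow
      have h1 : PySem.List.pyIdx? n (m - 1) = some (m - 1).toNat := by
        rw [PySem.List.pyIdx?, if_pos hp, if_pos (by omega : m - 1 < (n:Int))]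
      have h2 : PySem.List.pyIdx? row.length (m - 1) = some (m - 1).toNat := by
        rw [PySem.List.pyIdx?, if_pos hp, if_pos (by omega : m - 1 < (row.length:Int))]
      rw [h2, ← hidx, h1]
    · have hrl : row.length = n := hwrap (by omega) row hrow
      rw [hrl]; exact hidx
  have hci : ∀ row ∈ board, PySem.List.pyGetD row (m - 1) 0 = row.getD col 0 := by
    intro row hrow
    rw [pyGetD_pyIdx row (m - 1) 0 col (hidxrow row hrow)]
  obtain ⟨p, hpn, hptr, hstk⟩ := hcols col hcol
  have hlidx : PySem.List.pyIdx? l.length (m - 1) = some col := by rw [hllen]; exact hidx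
  have hpidx : PySem.List.pyIdx? ptr.length (m - 1) = some col := by rw [hplen]; exact hidx
  -- the stack / pointer reads
  have hstackread : PySem.List.pyGetD l (m - 1) [] = (picks (board.drop p) col).reverse := by
    rw [pyGetD_pyIdx l (m - 1) [] col hlidx, hstk]
  have hptrread : PySem.List.pyGetD ptr (m - 1) 0 = (p : Int) := by
    rw [pyGetD_pyIdx ptr (m - 1) 0 col hpidx, hptr]
  cases hq : picks (board.drop p) col with
  | nil =>
    -- empty column: A does nothing (the cancellation test fails on a chain), B's scan runs off
    have hscan : scanB board (m - 1) (p : Int) = (n : Int) :=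
      ((scan_char board col (m - 1) hci (n - p) p (by omega) hpn).1) hq
    have hA : stepA (l, c, ans) m = (l, c, ans) := by
      unfold stepA
      simp only [hstackread, hq, List.reverse_nil, List.length_nil]
      rw [if_neg (show ¬ ((1:Nat) ≤ 0) by omega)]
      rw [if_neg (no_cancel_of_chain c hch)]
    have hB : stepB board (ptr, c, ans) m = (ptr, c, ans) := by
      unfold stepB
      simp only [hptrread, hscan]
      rw [if_neg (by omega)]
    rw [hA, hB]
    exact ⟨rfl, rfl, hch, hllen, hplen, hcols⟩
  | cons v rest =>
    obtain ⟨j, hjp, hjn, hscan, hcell, hrest⟩ :=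
      (scan_char board col (m - 1) hci (n - p) p (by omega) hpn).2 v rest hq
    have hscan' : scanB board (m - 1) (PySem.List.pyGetD ptr (m - 1) 0) = (j : Int) := by
      rw [hptrread]; exact hscan
    -- A pops v, B reads board[j][col] = v
    have hstackrw : (picks (board.drop p) col).reverse = rest.reverse ++ [v] := by
      rw [hq, List.reverse_cons]
    have htop : PySem.List.pyGetD ((picks (board.drop p) col).reverse) (-1) 0 = v := by
      rw [hstackrw]; exact PySem.List.pyGetD_neg_one_append_singleton _ _ _
    have hdrop : ((picks (board.drop p) col).reverse).dropLast = rest.reverse := by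
      rw [hstackrw]; exact List.dropLast_concat
    have hlen1 : 1 ≤ ((picks (board.drop p) col).reverse).length := by
      rw [hstackrw]; simp
    have hvread : PySem.List.pyGetD (PySem.List.pyGetD board (j : Int) []) (m - 1) 0 = v := by
      rw [cell_read board (m - 1) col hci j hjn]; exact hcell
    have hset : PySem.List.pySetD l (m - 1) rest.reverse = l.set col rest.reverse :=
      pySetD_pyIdx l (m - 1) rest.reverse col hlidx
    have hsetp : PySem.List.pySetD ptr (m - 1) ((j : Int) + 1) = ptr.set col ((j : Int) + 1) :=
      pySetD_pyIdx ptr (m - 1) ((j : Int) + 1) col hpidx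
    -- reduce both steps
    have hA : stepA (l, c, ans) m =
        let c1 := c ++ [v]
        if 2 ≤ c1.length ∧ PySem.List.pyGetD c1 (-1) 0 = PySem.List.pyGetD c1 (-2) 0 then
          (l.set col rest.reverse, c1.dropLast.dropLast, ans + 2)
        else (l.set col rest.reverse, c1, ans) := by
      unfold stepA
      simp only [hstackread]
      rw [if_pos hlen1, htop, hdrop, hset]
    have hB : stepB board (ptr, c, ans) m =
        if c ≠ [] ∧ PySem.List.pyGetD c (-1) 0 = v then
          (ptr.set col ((j : Int) + 1), c.dropLast, ans + 2)
        else (ptr.set col ((j : Int) + 1), c ++ [v], ans) := by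
      unfold stepB
      simp only [hscan', hvread, hsetp]
      rw [if_pos (by exact_mod_cast hjn)]
    -- the new column invariant (common to all basket cases)
    have hcols' : ∀ col' : Nat, col' < n → ∃ p' : Nat, p' ≤ n ∧
        (ptr.set col ((j : Int) + 1)).getD col' 0 = (p' : Int) ∧
        (l.set col rest.reverse).getD col' [] = (picks (board.drop p') col').reverse := by
      intro col' hcol'
      by_cases hcc : col' = col
      · subst hcc
        refine ⟨j + 1, by omega, ?_, ?_⟩
        · rw [List.getD_eq_getElem?_getD, List.getElem?_set_self (by omega)]
          simp only [Option.getD_some]; push_cast; ring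
        · rw [List.getD_eq_getElem?_getD, List.getElem?_set_self (by omega)]
          simp [hrest]
      · obtain ⟨p', hp1, hp2, hp3⟩ := hcols col' hcol'
        refine ⟨p', hp1, ?_, ?_⟩
        · rw [List.getD_eq_getElem?_getD, List.getElem?_set_ne (fun he => hcc he.symm),
              ← List.getD_eq_getElem?_getD]
          exact hp2
        · rw [List.getD_eq_getElem?_getD, List.getElem?_set_ne (fun he => hcc he.symm),
              ← List.getD_eq_getElem?_getD]
          exact hp3
    rw [hA, hB]
    by_cases hcnil : c = []
    · -- push on an empty basket, no cancellation possible
      subst hcnil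
      rw [if_neg (by simp), if_neg (by simp)]
      exact ⟨rfl, rfl, by simp, by rw [List.length_set]; exact hllen, by rw [List.length_set]; exact hplen, hcols'⟩
    · -- basket last element vs v
      have hlast1 : PySem.List.pyGetD (c ++ [v]) (-1) 0 = v :=
        PySem.List.pyGetD_neg_one_append_singleton _ _ _
      have hcpos : 0 < c.length := List.length_pos_iff.mpr hcnil
      have hlast2 : PySem.List.pyGetD (c ++ [v]) (-2) 0 = c.getLast hcnil := by
        have h2len : 2 ≤ (c ++ [v]).length := by simp; omega
        rw [PySem.List.pyGetD_neg_ofNat (c ++ [v]) 2 0 (by omega) h2len]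
        have hidx : (c ++ [v]).length - 2 = c.length - 1 := by simp
        simp only [hidx]
        rw [List.getElem_append_left (by omega)]
        exact (List.getLast_eq_getElem hcnil).symm
      have hlastc : PySem.List.pyGetD c (-1) 0 = c.getLast hcnil :=
        PySem.List.pyGetD_neg_one c 0 hcnil
      by_cases heqv : c.getLast hcnil = v
      · -- cancellation on both sides
        have hcA : 2 ≤ (c ++ [v]).length ∧
            PySem.List.pyGetD (c ++ [v]) (-1) 0 = PySem.List.pyGetD (c ++ [v]) (-2) 0 :=
          ⟨by simp; omega, by rw [hlast1, hlast2, heqv]⟩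
        have hcB : c ≠ [] ∧ PySem.List.pyGetD c (-1) 0 = v := ⟨hcnil, by rw [hlastc, heqv]⟩
        rw [if_pos hcA, if_pos hcB]
        have hdl : (c ++ [v]).dropLast.dropLast = c.dropLast := by
          rw [List.dropLast_concat]
        refine ⟨by rw [hdl], rfl, ?_, by rw [List.length_set]; exact hllen, by rw [List.length_set]; exact hplen, hcols'⟩
        · rw [hdl]
          exact hch.prefix (List.dropLast_prefix c)
      · -- push on both sides
        rw [if_neg (by rintro ⟨-, hx⟩; rw [hlast1, hlast2] at hx; exact heqv hx.symm),
            if_neg (by rintro ⟨-, hx⟩; rw [hlastc] at hx; exact heqv hx)]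
        refine ⟨rfl, rfl, ?_, by rw [List.length_set]; exact hllen, by rw [List.length_set]; exact hplen, hcols'⟩
        · rw [List.isChain_append]
          refine ⟨hch, by simp, ?_⟩
          intro x hx y hy
          simp only [List.head?_cons, Option.mem_def, Option.some.injEq] at hy
          rw [List.getLast?_eq_some_getLast hcnil] at hx
          simp only [Option.mem_def, Option.some.injEq] at hx
          subst hx hy
          exact heqv

theorem fold_rel (board : List (List Int)) (moves : List Int)
    (hm : ∀ m ∈ moves, 1 - (board.length : Int) ≤ m ∧ m ≤ (board.length : Int))
    (hsq : ∀ row ∈ board, board.length ≤ row.length)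
    (hwrap : (∃ m ∈ moves, m ≤ 0) → ∀ row ∈ board, row.length = board.length) :
    ∀ (s : List (List Int) × List Int × Int) (t : List Int × List Int × Int),
      SimRel board s t → SimRel board (moves.foldl stepA s) (moves.foldl (stepB board) t) := by
  induction moves with
  | nil => intro s t h; exact h
  | cons m ms ih =>
    intro s t h
    have hm1 := hm m List.mem_cons_self
    exact ih (fun x hx => hm x (List.mem_cons_of_mem _ hx))
      (fun hx => hwrap ⟨hx.choose, List.mem_cons_of_mem _ hx.choose_spec.1, hx.choose_spec.2⟩) _ _
      (step_rel board m hm1.1 hm1.2 hsq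
        (fun h0 => hwrap ⟨m, List.mem_cons_self, h0⟩) s t h)

theorem init_rel (board : List (List Int)) :
    SimRel board ((PySem.List.pyRange 0 (board.length : Int) 1).map (fun i => buildCol board i),
               [], 0)
              (List.replicate board.length 0, [], 0) := by
  refine ⟨rfl, rfl, by simp, ?_, by simp, ?_⟩
  · simp [PySem.List.length_pyRange_one]
  · intro col hcol
    refine ⟨0, by omega, ?_, ?_⟩
    · rw [List.getD_replicate _ hcol]; norm_num
    · have := PySem.List.getElem?_map_pyRange_zero (fun i => buildCol board i)
        board.length col hcol
      rw [List.getD_eq_getElem?_getD, this]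
      simp only [Option.getD_some]
      rw [buildCol_eq board col]
      simp


-- ===== VERDICT (by name: the statement is the Claim_ definition above) =====
theorem solution_spec : Claim_equal_solution := by
  intro board moves _ hpre
  unfold Spec_solution solution solution_alt
  have h := fold_rel board moves hpre.2.1 hpre.1 hpre.2.2 _ _ (init_rel board)
  exact h.2.1.symm ▸ rfl
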